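-- pv_equiv track=rewrite | github.com/AIchemizt/dance-analysis-server | analyzer/utils.py | temporal_filter
-- ===== SOURCE A (Python) =====
-- from typing import List, Tuple
--
-- def temporal_filter(detections: List[bool], min_consecutive: int = 3) -> List[bool]:
--     """
--     Filter pose detections to require minimum consecutive frames.
--
--     Reduces false positives by ensuring a pose is held for at least N frames.
--     For example, if someone briefly passes through T-pose while transitioning,
--     we don't want to count it.
--
--     Args:
--         detections: Boolean list of frame-by-frame detections
--         min_consecutive: Minimum consecutive True values required
--
--     Returns:
--         Filtered boolean list
--     """
--     filtered = [False] * len(detections)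
--
--     consecutive_count = 0
--     for i, detected in enumerate(detections):
--         if detected:
--             consecutive_count += 1
--             if consecutive_count >= min_consecutive:
--                 # Mark the last min_consecutive frames as valid
--                 for j in range(max(0, i - min_consecutive + 1), i + 1):
--                     filtered[j] = True
--         else:
--             consecutive_count = 0
--
--     return filtered
-- ===== SOURCE B (Python) =====
-- from typing import List
--
-- def temporal_filter(detections: List[bool], min_consecutive: int = 3) -> List[bool]:
--     """Single left-to-right pass over maximal runs: a frame is kept iff it lies in a
--     True run at least min_consecutive long and the threshold is positive
--     (a threshold below 1 can never mark anything)."""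
--     out = []
--     n = len(detections)
--     i = 0
--     while i < n:
--         j = i + 1
--         while j < n and detections[j] == detections[i]:
--             j += 1
--         keep = detections[i] and (j - i) >= min_consecutive >= 1
--         out.extend([keep] * (j - i))
--         i = j
--     return out
-- ===== Notes on version B (the rewrite author's own statement) =====
-- stated objective: alternative
-- what changed: Replaces A's backfill (re-marking the last min_consecutive frames at every qualifying index) with a single run-length scan that emits each maximal run at once, keeping a run iff it is True and at least min_consecutive (>= 1) frames long.
import Mathlib
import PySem

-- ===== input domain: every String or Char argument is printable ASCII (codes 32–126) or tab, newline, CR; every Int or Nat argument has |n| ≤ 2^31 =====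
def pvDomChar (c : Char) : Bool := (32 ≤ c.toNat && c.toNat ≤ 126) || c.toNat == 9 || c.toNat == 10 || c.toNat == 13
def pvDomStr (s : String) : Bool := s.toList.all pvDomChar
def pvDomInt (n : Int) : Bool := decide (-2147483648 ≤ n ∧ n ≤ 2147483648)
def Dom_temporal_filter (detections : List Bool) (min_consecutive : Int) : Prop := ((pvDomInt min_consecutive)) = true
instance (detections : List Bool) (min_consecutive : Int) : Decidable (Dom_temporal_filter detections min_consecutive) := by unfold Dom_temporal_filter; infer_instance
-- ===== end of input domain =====

-- B replaces A's per-index backfill of the last min_consecutive frames with a single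
-- run-length scan that emits each maximal run at once (objective: alternative algorithm).

-- ===== PORT A =====
-- loop body of A's `for i, detected in enumerate(detections)` (st = (filtered, consecutive_count));
-- `filtered[j] = True` is pySetD: j ranges over max(0, i-min_consecutive+1) .. i, always in range
def tfStep (min_consecutive : Int) (st : List Bool × Int) (p : Int × Bool) : List Bool × Int :=
  if p.2 then
    let c := st.2 + 1
    if c ≥ min_consecutive then
      ((PySem.List.pyRange (max 0 (p.1 - min_consecutive + 1)) (p.1 + 1) 1).foldl
        (fun f j => PySem.List.pySetD f j true) st.1, c)
    else (st.1, c)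
  else (st.1, 0)

def temporal_filter (detections : List Bool) (min_consecutive : Int) : List Bool :=
  ((PySem.List.enumerate detections 0).foldl (tfStep min_consecutive)
    (List.replicate detections.length false, 0)).1

-- ===== PORT B =====
-- length of the run of `b`s at the head of the list (B's inner `while` advancing j)
def runLen (b : Bool) : List Bool → Nat
  | [] => 0
  | x :: xs => if x = b then runLen b xs + 1 else 0

-- B's outer `while i < n` loop, one maximal run per step; the fuel argument
-- (initially the list length, enough since each step consumes ≥ 1 element) only
-- makes the recursion structural
def tfAltGo (fuel : Nat) (m : Int) (xs : List Bool) : List Bool :=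
  match fuel, xs with
  | _, [] => []
  | 0, _ => []
  | fuel + 1, d :: rest =>
    List.replicate (runLen d rest + 1)
        (d && (decide (m ≤ ((runLen d rest + 1 : Nat) : Int)) && decide (1 ≤ m)))
      ++ tfAltGo fuel m (rest.drop (runLen d rest))

def temporal_filter_alt (detections : List Bool) (min_consecutive : Int) : List Bool :=
  tfAltGo detections.length min_consecutive detections

-- ===== PRECONDITION & SPEC =====
def Spec_temporal_filter (detections : List Bool) (min_consecutive : Int) (out : List Bool) : Prop := out = temporal_filter_alt detections min_consecutive
instance (detections : List Bool) (min_consecutive : Int) (out : List Bool) : Decidable (Spec_temporal_filter detections min_consecutive out) := by unfold Spec_temporal_filter; infer_instance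

-- ===== CLAIM (what is proved, stated in full; the proofs are below) =====
def Claim_equal_temporal_filter : Prop := ∀ (detections : List Bool) (min_consecutive : Int), Dom_temporal_filter detections min_consecutive → Spec_temporal_filter detections min_consecutive (temporal_filter detections min_consecutive)

-- ===== LEMMAS AND PROOFS =====

lemma runLen_le (b : Bool) (xs : List Bool) : runLen b xs ≤ xs.length := by
  induction xs with
  | nil => simp [runLen]
  | cons x xs ih => simp only [runLen]; split <;> simp only [List.length_cons] <;> omega

-- single-step (frame-by-frame) reformulation of B's run-at-a-time output,
-- carrying c = length of the pending True-run
-- the value B emits for a True run of length c: kept iff c ≥ m and m ≥ 1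
def emit (m : Int) (c : Nat) : Bool := decide (m ≤ (c : Int)) && decide (1 ≤ m)

lemma emit_pos (m : Int) (c : Nat) (h1 : 1 ≤ m) (h2 : m ≤ (c : Int)) : emit m c = true := by
  simp [emit, h1, h2]

lemma emit_big (m : Int) (c : Nat) (h : ¬ m ≤ (c : Int)) : emit m c = false := by
  unfold emit
  rw [decide_eq_false h]
  simp

lemma emit_nonpos (m : Int) (c : Nat) (h : ¬ 1 ≤ m) : emit m c = false := by
  unfold emit
  rw [decide_eq_false h]
  simp

def altFrom (m : Int) (c : Nat) : List Bool → List Bool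
  | [] => List.replicate c (emit m c)
  | true :: r => altFrom m (c + 1) r
  | false :: r => List.replicate c (emit m c) ++ false :: altFrom m 0 r

lemma head?_drop_runLen (b : Bool) (xs : List Bool) :
    (xs.drop (runLen b xs)).head? ≠ some b := by
  induction xs with
  | nil => simp [runLen]
  | cons x xs ih =>
    simp only [runLen]
    by_cases h : x = b
    · simp only [if_pos h, List.drop_succ_cons]
      exact ih
    · simp [h]

lemma altFrom_run (m : Int) (xs : List Bool) : ∀ c : Nat,
    altFrom m c xs = altFrom m (c + runLen true xs) (xs.drop (runLen true xs)) := by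
  induction xs with
  | nil => intro c; simp [runLen]
  | cons x xs ih =>
    intro c
    match x with
    | false => simp [runLen]
    | true =>
      show altFrom m (c + 1) xs = _
      rw [ih (c + 1), show runLen true (true :: xs) = runLen true xs + 1 from by simp [runLen]]
      simp only [List.drop_succ_cons]
      congr 1
      omega

lemma altFrom_flush (m : Int) (c : Nat) (xs : List Bool) (h : xs.head? ≠ some true) :
    altFrom m c xs = List.replicate c (emit m c) ++ altFrom m 0 xs := by
  match xs with
  | [] => simp [altFrom]
  | true :: r => simp at h
  | false :: r => simp [altFrom]

lemma altFrom_false_run (m : Int) (xs : List Bool) :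
    altFrom m 0 xs = List.replicate (runLen false xs) false ++ altFrom m 0 (xs.drop (runLen false xs)) := by
  induction xs with
  | nil => simp [runLen]
  | cons x xs ih =>
    match x with
    | true => simp [runLen]
    | false =>
      rw [show runLen false (false :: xs) = runLen false xs + 1 from by simp [runLen]]
      simp only [List.drop_succ_cons, List.replicate_succ]
      show altFrom m 0 (false :: xs) = false :: (List.replicate (runLen false xs) false ++ _)
      simp only [altFrom, List.replicate_zero, List.nil_append]
      rw [ih]

lemma tfAltGo_eq_altFrom (m : Int) : ∀ (fuel : Nat) (xs : List Bool), xs.length ≤ fuel →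
    tfAltGo fuel m xs = altFrom m 0 xs := by
  intro fuel
  induction fuel with
  | zero =>
    intro xs h
    match xs with
    | [] => rfl
    | x :: r => simp at h
  | succ fuel ih =>
    intro xs h
    rcases xs with _ | ⟨d, rest⟩
    · rfl
    · simp only [List.length_cons] at h
      rw [tfAltGo]
      have hle := runLen_le d rest
      rw [ih (rest.drop (runLen d rest)) (by simp only [List.length_drop]; omega)]
      match d with
      | true =>
        show List.replicate (runLen true rest + 1) (emit m (runLen true rest + 1))
            ++ altFrom m 0 (rest.drop (runLen true rest)) = altFrom m 1 rest
        rw [altFrom_run m rest 1, Nat.add_comm 1 (runLen true rest),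
          altFrom_flush m (runLen true rest + 1) _ (head?_drop_runLen true rest)]
      | false =>
        show List.replicate (runLen false rest + 1) false ++ _ = altFrom m 0 (false :: rest)
        have h0 : altFrom m 0 (false :: rest) = false :: altFrom m 0 rest := by
          simp [altFrom]
        rw [h0, altFrom_false_run m rest, List.replicate_succ]
        simp

-- A's loop body, case by case
lemma tfStep_false (m : Int) (f : List Bool) (c i : Int) :
    tfStep m (f, c) (i, false) = (f, 0) := by
  simp [tfStep]

lemma tfStep_true_lt (m : Int) (f : List Bool) (c i : Int) (h : ¬ c + 1 ≥ m) :
    tfStep m (f, c) (i, true) = (f, c + 1) := by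
  simp only [tfStep]
  rw [if_pos trivial, if_neg h]

lemma tfStep_true_ge (m : Int) (f : List Bool) (c i : Int) (h : c + 1 ≥ m) :
    tfStep m (f, c) (i, true)
      = ((PySem.List.pyRange (max 0 (i - m + 1)) (i + 1) 1).foldl
          (fun g j => PySem.List.pySetD g j true) f, c + 1) := by
  simp only [tfStep]
  rw [if_pos trivial, if_pos h]

-- A's fold never touches `filtered` when min_consecutive ≤ 0: the backfill range is empty
lemma tf_preserve (m : Int) (hm : m ≤ 0) : ∀ (rest : List Bool) (i : Int) (f : List Bool) (c : Int),
    ((PySem.List.enumerate rest i).foldl (tfStep m) (f, c)).1 = f := by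
  intro rest
  induction rest with
  | nil => intro i f c; rfl
  | cons d rest ih =>
    intro i f c
    rw [PySem.List.enumerate_cons, List.foldl_cons]
    match d with
    | false =>
      rw [tfStep_false]
      exact ih (i + 1) f 0
    | true =>
      by_cases hge : c + 1 ≥ m
      · rw [tfStep_true_ge m f c i hge, PySem.List.pyRange_one_eq_nil (by omega)]
        exact ih (i + 1) f (c + 1)
      · rw [tfStep_true_lt m f c i hge]
        exact ih (i + 1) f (c + 1)

lemma tf_neg (m : Int) (hm : m ≤ 0) (det : List Bool) :
    temporal_filter det m = List.replicate det.length false := by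
  unfold temporal_filter
  exact tf_preserve m hm det 0 _ 0

lemma set_append_cons (pre l : List Bool) (x v : Bool) :
    (pre ++ x :: l).set pre.length v = pre ++ v :: l := by
  induction pre with
  | nil => rfl
  | cons p pre ih => simp [ih]

-- A's inner backfill loop: setting the mid.length consecutive indices starting at a
-- (= the length of pre) to true
lemma foldl_pySetD_shape : ∀ (mid : List Bool) (a : Int) (pre post : List Bool),
    0 ≤ a → pre.length = a.toNat →
    (PySem.List.pyRange a (a + mid.length) 1).foldl (fun g j => PySem.List.pySetD g j true)
      (pre ++ mid ++ post)
    = pre ++ List.replicate mid.length true ++ post := by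
  intro mid
  induction mid with
  | nil =>
    intro a pre post h0 hl
    simp only [List.length_nil, Nat.cast_zero, add_zero]
    rw [PySem.List.pyRange_one_eq_nil le_rfl]
    simp
  | cons x mid ih =>
    intro a pre post h0 hl
    rw [PySem.List.pyRange_one_cons (by simp only [List.length_cons]; push_cast; omega)]
    simp only [List.foldl_cons]
    rw [PySem.List.pySetD_of_nonneg _ _ h0, ← hl]
    rw [show pre ++ x :: mid ++ post = pre ++ x :: (mid ++ post) from by simp,
      set_append_cons]
    rw [show a + ((List.length (x :: mid) : Nat) : Int) = (a + 1) + (mid.length : Int) from by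
      simp; ring]
    rw [show pre ++ true :: (mid ++ post) = (pre ++ [true]) ++ mid ++ post from by simp]
    rw [ih (a + 1) (pre ++ [true]) post (by omega) (by simp; omega)]
    simp [List.replicate_succ, List.append_assoc]

-- A's fold invariant (min_consecutive ≥ 1): entering index i = done.length + c with c
-- pending Trues, filtered = done ++ replicate c (c ≥ m) ++ untouched falses
lemma foldA_eq (m : Int) (hm : 1 ≤ m) : ∀ (rest done : List Bool) (c : Nat),
    ((PySem.List.enumerate rest ((done.length + c : Nat) : Int)).foldl (tfStep m)
      (done ++ List.replicate c (emit m c) ++ List.replicate rest.length false,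
        (c : Int))).1
    = done ++ altFrom m c rest := by
  intro rest
  induction rest with
  | nil =>
    intro done c
    simp [altFrom]
  | cons d rest ih =>
    intro done c
    rw [PySem.List.enumerate_cons, List.foldl_cons]
    simp only [List.length_cons]
    match d with
    | false =>
      rw [tfStep_false]
      have H := ih (done ++ List.replicate c (emit m c) ++ [false]) 0
      rw [show ((((done ++ List.replicate c (emit m c) ++ [false]).length + 0 : Nat)) : Int)
          = ((done.length + c : Nat) : Int) + 1 from by simp; ring] at H
      rw [show (done ++ List.replicate c (emit m c) ++ [false])
            ++ List.replicate (0 : Nat) (emit m 0) ++ List.replicate rest.length false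
          = done ++ List.replicate c (emit m c) ++ List.replicate (rest.length + 1) false from by
        simp [List.replicate_succ, List.append_assoc]] at H
      rw [show (done ++ List.replicate c (emit m c) ++ [false]) ++ altFrom m 0 rest
          = done ++ altFrom m c (false :: rest) from by
        rw [altFrom_flush m c (false :: rest) (by simp)]
        simp [altFrom, List.append_assoc]] at H
      rw [show (((0 : Nat)) : Int) = (0 : Int) from by norm_num] at H
      exact H
    | true =>
      by_cases hge : (c : Int) + 1 ≥ m
      · rw [tfStep_true_ge _ _ _ _ hge]
        have hset : (PySem.List.pyRange (max 0 (((done.length + c : Nat) : Int) - m + 1))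
              (((done.length + c : Nat) : Int) + 1) 1).foldl
              (fun g j => PySem.List.pySetD g j true)
              (done ++ List.replicate c (emit m c) ++ List.replicate (rest.length + 1) false)
            = done ++ List.replicate (c + 1) true ++ List.replicate rest.length false := by
          have hmn : 1 ≤ m.toNat ∧ m.toNat ≤ c + 1 := by
            constructor <;> omega
          have hc : c = (c + 1 - m.toNat) + (m.toNat - 1) := by omega
          have hsplit : List.replicate c (emit m c)
              = List.replicate (c + 1 - m.toNat) (emit m c)
                ++ List.replicate (m.toNat - 1) (emit m c) := by
            rw [← List.replicate_add, ← hc]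
          have hpre : List.replicate (c + 1 - m.toNat) (emit m c)
              = List.replicate (c + 1 - m.toNat) true := by
            match hs : c + 1 - m.toNat with
            | 0 => rfl
            | s + 1 =>
              congr 1
              exact emit_pos m c hm (by omega)
          rw [show done ++ List.replicate c (emit m c) ++ List.replicate (rest.length + 1) false
              = (done ++ List.replicate (c + 1 - m.toNat) true)
                ++ (List.replicate (m.toNat - 1) (emit m c) ++ [false])
                ++ List.replicate rest.length false from by
            rw [hsplit, hpre]
            simp [List.replicate_succ, List.append_assoc]]
          rw [show max 0 (((done.length + c : Nat) : Int) - m + 1)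
              = ((done.length + c : Nat) : Int) - m + 1 from by omega]
          rw [show ((done.length + c : Nat) : Int) + 1
              = (((done.length + c : Nat) : Int) - m + 1)
                + (((List.replicate (m.toNat - 1) (emit m c) ++ [false]).length : Nat) : Int) from by
            simp; omega]
          rw [foldl_pySetD_shape _ _ _ _ (by push_cast; omega) (by simp; omega)]
          rw [show ((List.replicate (m.toNat - 1) (emit m c) ++ [false]).length) = m.toNat from by
            simp; omega]
          have hmerge : List.replicate (c + 1 - m.toNat) true ++ List.replicate m.toNat true
              = List.replicate (c + 1) true := by
            rw [← List.replicate_add]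
            congr 1
            omega
          have hmerge2 : done ++ List.replicate (c + 1 - m.toNat) true ++ List.replicate m.toNat true
              = done ++ List.replicate (c + 1) true := by
            rw [List.append_assoc, hmerge]
          rw [hmerge2]
        rw [hset]
        have H := ih done (c + 1)
        rw [show (((done.length + (c + 1) : Nat)) : Int) = ((done.length + c : Nat) : Int) + 1 from by
          push_cast; ring] at H
        rw [show List.replicate (c + 1) (emit m (c + 1)) = List.replicate (c + 1) true from by
          congr 1
          exact emit_pos m (c + 1) hm (by push_cast; omega)] at H
        rw [show (((c + 1 : Nat)) : Int) = (c : Int) + 1 from by push_cast; ring] at H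
        exact H
      · rw [tfStep_true_lt _ _ _ _ hge]
        have H := ih done (c + 1)
        rw [show (((done.length + (c + 1) : Nat)) : Int) = ((done.length + c : Nat) : Int) + 1 from by
          push_cast; ring] at H
        rw [show List.replicate (c + 1) (emit m (c + 1))
            = List.replicate c (emit m c) ++ [false] from by
          rw [emit_big m (c + 1) (by omega), emit_big m c (by omega),
            List.replicate_succ']] at H
        rw [show (done ++ (List.replicate c (emit m c) ++ [false])
              ++ List.replicate rest.length false)
            = done ++ List.replicate c (emit m c) ++ List.replicate (rest.length + 1) false from by
          simp [List.replicate_succ, List.append_assoc]] at H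
        rw [show (((c + 1 : Nat)) : Int) = (c : Int) + 1 from by push_cast; ring] at H
        exact H

-- when min_consecutive < 1 B emits false everywhere, like A
lemma altFrom_nonpos (m : Int) (hm : ¬ 1 ≤ m) : ∀ (xs : List Bool) (c : Nat),
    altFrom m c xs = List.replicate (c + xs.length) false := by
  intro xs
  induction xs with
  | nil =>
    intro c
    show List.replicate c (emit m c) = _
    rw [emit_nonpos m c hm]
    simp
  | cons x xs ih =>
    intro c
    match x with
    | true =>
      show altFrom m (c + 1) xs = _
      rw [ih (c + 1)]
      congr 1
      simp only [List.length_cons]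
      omega
    | false =>
      show List.replicate c (emit m c) ++ false :: altFrom m 0 xs = _
      rw [emit_nonpos m c hm, ih 0]
      simp only [Nat.zero_add, List.length_cons, ← List.replicate_succ]
      rw [← List.replicate_add]

-- ===== VERDICT (by name: the statement is the Claim_ definition above) =====
theorem temporal_filter_spec : Claim_equal_temporal_filter := by
  intro det m _
  show temporal_filter det m = temporal_filter_alt det m
  unfold temporal_filter_alt
  rw [tfAltGo_eq_altFrom m det.length det le_rfl]
  by_cases hm : 1 ≤ m
  · have := foldA_eq m hm det [] 0
    simpa [temporal_filter] using this
  · have hm' : m ≤ 0 := by omega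
    rw [tf_neg m hm' det, altFrom_nonpos m hm det 0, Nat.zero_add]
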